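-- pv_equiv track=rewrite | github.com/sjtututu/datasource | Engine/TechFunc.py | up_n
-- ===== SOURCE A (Python) =====
-- import itertools
--
-- def up_n(Series):
--     """
--     连续上涨天数，当天收盘价大于开盘价即为上涨一天 # 同花顺实际结果用收盘价-前一天收盘价
--     """
--     m = []
--     for k, g in itertools.groupby(Series):
--         t = 0
--         for i in g:
--             if k == 0:
--                 m.append(0)
--             else:
--                 t += 1
--                 m.append(t)
--     return m
-- ===== SOURCE B (Python) =====
-- from itertools import accumulate
--
-- def up_n(Series):
--     # staged passes: mark run starts, compute each position's run-start index,
--     # then derive every output by arithmetic (no counter, no grouping loop)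
--     n = len(Series)
--     is_start = [i == 0 or not (Series[i - 1] == Series[i]) for i in range(n)]
--     run_start = list(accumulate(range(n), lambda s, i: i if is_start[i] else s))
--     return [0 if v == 0 else i - run_start[i] + 1 for i, v in enumerate(Series)]
-- ===== Notes on version B (the rewrite author's own statement) =====
-- stated objective: alternative
-- what changed: Replaces groupby's nested group/element loops carrying a counter with three staged passes: a boolean run-start mask, an accumulated run-start-index array, and a final arithmetic comprehension i - run_start[i] + 1.
import Mathlib
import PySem

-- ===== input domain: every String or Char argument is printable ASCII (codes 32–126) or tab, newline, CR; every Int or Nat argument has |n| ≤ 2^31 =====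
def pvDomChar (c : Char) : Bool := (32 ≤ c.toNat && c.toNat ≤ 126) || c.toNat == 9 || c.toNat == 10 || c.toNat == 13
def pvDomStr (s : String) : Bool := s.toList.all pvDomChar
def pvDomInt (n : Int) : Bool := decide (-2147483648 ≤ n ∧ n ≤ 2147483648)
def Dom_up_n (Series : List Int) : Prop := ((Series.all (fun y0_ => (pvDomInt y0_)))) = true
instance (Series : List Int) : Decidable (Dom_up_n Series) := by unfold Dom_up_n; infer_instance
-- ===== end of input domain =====

-- B replaces A's itertools.groupby nested loops by three staged passes: a run-start mask,
-- an accumulated run-start-index array, and an arithmetic comprehension (objective: alternative).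

-- ===== PORT A =====
-- itertools.groupby over a list: successive runs of `==`-equal elements, as (key, group) pairs
def pyGroupby (l : List Int) : List (Int × List Int) :=
  match l with
  | [] => []
  | x :: xs =>
    (x, x :: xs.takeWhile (· == x)) :: pyGroupby (xs.dropWhile (· == x))
termination_by l.length
decreasing_by
  simp only [List.length_cons]
  exact Nat.lt_succ_of_le (List.length_dropWhile_le _ _)

-- A's inner loop: 't = 0; for i in g: if k == 0: m.append(0) else: t += 1; m.append(t)'
def innerA (k : Int) (g : List Int) (st : List Int × Int) : List Int × Int :=
  g.foldl (fun st _ => if k = 0 then (st.1 ++ [0], st.2) else (st.1 ++ [st.2 + 1], st.2 + 1)) st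

def up_n (Series : List Int) : List Int :=
  (pyGroupby Series).foldl (fun m kg => (innerA kg.1 kg.2 (m, 0)).1) []

-- ===== PORT B =====
-- itertools.accumulate(iterable, f): first element yielded as-is, then the running fold
def accGo (f : Int → Int → Int) (acc : Int) : List Int → List Int
  | [] => []
  | y :: ys => f acc y :: accGo f (f acc y) ys

def pyAccumulate (f : Int → Int → Int) : List Int → List Int
  | [] => []
  | x :: xs => x :: accGo f x xs

-- all list indexing in Source B is by nonnegative in-range ints, where pyGetD is exact
def up_n_alt (Series : List Int) : List Int :=
  let n : Int := Series.length
  let isStart : List Bool := (PySem.List.pyRange 0 n 1).map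
    (fun i => decide (i = 0) || !(PySem.List.pyGetD Series (i - 1) 0 == PySem.List.pyGetD Series i 0))
  let runStart : List Int := pyAccumulate
    (fun s i => if PySem.List.pyGetD isStart i false then i else s)
    (PySem.List.pyRange 0 n 1)
  (PySem.List.enumerate Series 0).map
    (fun p => if p.2 = 0 then 0 else p.1 - PySem.List.pyGetD runStart p.1 0 + 1)

-- ===== PRECONDITION & SPEC =====
def Spec_up_n (Series : List Int) (out : List Int) : Prop := out = up_n_alt Series
instance (Series : List Int) (out : List Int) : Decidable (Spec_up_n Series out) := by unfold Spec_up_n; infer_instance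

-- ===== CLAIM (what is proved, stated in full; the proofs are below) =====
def Claim_equal_up_n : Prop := ∀ (Series : List Int), Dom_up_n Series → Spec_up_n Series (up_n Series)

-- ===== LEMMAS AND PROOFS =====

-- proof-side names for B's three stages
def ISm (l : List Int) : List Bool :=
  (PySem.List.pyRange 0 (l.length : Int) 1).map
    (fun i => decide (i = 0) || !(PySem.List.pyGetD l (i - 1) 0 == PySem.List.pyGetD l i 0))

def RSm (l : List Int) : List Int :=
  pyAccumulate
    (fun s i => if PySem.List.pyGetD (ISm l) i false then i else s)
    (PySem.List.pyRange 0 (l.length : Int) 1)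

theorem up_n_alt_def (l : List Int) :
    up_n_alt l = (PySem.List.enumerate l 0).map
      (fun p => if p.2 = 0 then 0 else p.1 - PySem.List.pyGetD (RSm l) p.1 0 + 1) := rfl

-- the output a whole run of value x and length len contributes
def runOut (x : Int) (len : Nat) : List Int :=
  if x = 0 then List.replicate len 0 else (List.range len).map (fun j : Nat => (j : Int) + 1)

theorem runOut_length (x : Int) (len : Nat) : (runOut x len).length = len := by
  unfold runOut; split_ifs <;> simp

-- ---- A-side lemmas ----

theorem innerA_cons (k a : Int) (g : List Int) (m : List Int) (t : Int) :
    innerA k (a :: g) (m, t) =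
      innerA k g (if k = 0 then (m ++ [0], t) else (m ++ [t + 1], t + 1)) := rfl

theorem innerA_extract (k : Int) (g : List Int) : ∀ (m : List Int) (t : Int),
    innerA k g (m, t) = (m ++ (innerA k g ([], t)).1, (innerA k g ([], t)).2) := by
  induction g with
  | nil => intro m t; simp [innerA]
  | cons a g ih =>
    intro m t
    rw [innerA_cons, innerA_cons]
    split_ifs with hk
    · rw [ih (m ++ [0]) t, ih ([] ++ [0]) t]
      simp
    · rw [ih (m ++ [t + 1]) (t + 1), ih ([] ++ [t + 1]) (t + 1)]
      simp

theorem innerA_closed (k : Int) (g : List Int) : ∀ (t : Int),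
    (innerA k g ([], t)).1 =
      if k = 0 then List.replicate g.length 0
      else (List.range g.length).map (fun j : Nat => t + (j : Int) + 1) := by
  induction g with
  | nil => intro t; simp [innerA]
  | cons a g ih =>
    intro t
    rw [innerA_cons]
    split_ifs with hk
    · rw [innerA_extract k g ([] ++ [0]) t]
      simp only [List.nil_append, ih t, if_pos hk]
      simp [List.replicate_succ]
    · rw [innerA_extract k g ([] ++ [t + 1]) (t + 1)]
      simp only [List.nil_append, ih (t + 1), if_neg hk]
      simp only [List.length_cons]
      rw [List.range_succ_eq_map]
      simp only [List.map_cons, List.map_map, List.singleton_append]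
      congr 1
      · push_cast; ring
      · apply List.map_congr_left
        intro j _
        simp only [Function.comp]
        push_cast; ring

theorem outer_extract (l : List (Int × List Int)) : ∀ (m : List Int),
    l.foldl (fun m kg => (innerA kg.1 kg.2 (m, 0)).1) m =
      m ++ l.foldl (fun m kg => (innerA kg.1 kg.2 (m, 0)).1) [] := by
  induction l with
  | nil => intro m; simp
  | cons kg l ih =>
    intro m
    rw [List.foldl_cons, List.foldl_cons]
    have h1 : (innerA kg.1 kg.2 (m, 0)).1 = m ++ (innerA kg.1 kg.2 ([], 0)).1 := by
      rw [innerA_extract]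
    have h2 : (innerA kg.1 kg.2 ([], 0)).1 = [] ++ (innerA kg.1 kg.2 ([], 0)).1 := by simp
    rw [h1, ih (m ++ (innerA kg.1 kg.2 ([], 0)).1)]
    conv_rhs => rw [h2]
    rw [ih ([] ++ (innerA kg.1 kg.2 ([], 0)).1)]
    simp

theorem up_n_cons (x : Int) (xs : List Int) :
    up_n (x :: xs) =
      runOut x (xs.takeWhile (· == x)).length.succ ++ up_n (xs.dropWhile (· == x)) := by
  show (pyGroupby (x :: xs)).foldl _ [] = _
  rw [pyGroupby, List.foldl_cons, outer_extract]
  have h := innerA_closed x (x :: xs.takeWhile (· == x)) 0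
  simp only [List.length_cons] at h
  rw [show (innerA x (x :: xs.takeWhile (· == x)) ([], 0)).1 =
      runOut x (xs.takeWhile (· == x)).length.succ by
    rw [h]; unfold runOut
    split_ifs <;> simp]
  rfl

-- ---- B-side lemmas ----

theorem accGo_length (f : Int → Int → Int) (l : List Int) : ∀ (acc : Int),
    (accGo f acc l).length = l.length := by
  induction l with
  | nil => intro acc; rfl
  | cons y ys ih => intro acc; simp [accGo, ih]

theorem pyAccumulate_length (f : Int → Int → Int) (l : List Int) :
    (pyAccumulate f l).length = l.length := by
  cases l with
  | nil => rfl
  | cons x xs => simp [pyAccumulate, accGo_length]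

theorem accGo_append (f : Int → Int → Int) (a : List Int) : ∀ (acc : Int) (b : List Int),
    accGo f acc (a ++ b) =
      accGo f acc a ++ accGo f ((accGo f acc a).getLastD acc) b := by
  induction a with
  | nil => intro acc b; simp [accGo]
  | cons y ys ih =>
    intro acc b
    simp only [List.cons_append, accGo, List.cons_append]
    rw [ih (f acc y) b]
    congr 2
    cases h : accGo f (f acc y) ys with
    | nil => simp [List.getLastD]
    | cons z zs => simp [List.getLastD]

theorem accGo_const (f : Int → Int → Int) (acc : Int) (idxs : List Int)
    (h : ∀ i ∈ idxs, f acc i = acc) :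
    accGo f acc idxs = List.replicate idxs.length acc := by
  induction idxs with
  | nil => rfl
  | cons y ys ih =>
    have hy : f acc y = acc := h y (List.mem_cons_self ..)
    simp only [accGo, hy, List.length_cons, List.replicate_succ]
    exact congrArg _ (ih (fun i hi => h i (List.mem_cons_of_mem _ hi)))

theorem accGo_shift (f2 f1 : Int → Int → Int) (L : Int) (idxs : List Int)
    (h : ∀ a i, i ∈ idxs → f2 (a + L) (i + L) = f1 a i + L) : ∀ (acc : Int),
    accGo f2 (acc + L) (idxs.map (· + L)) = (accGo f1 acc idxs).map (· + L) := by
  induction idxs with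
  | nil => intro acc; rfl
  | cons y ys ih =>
    intro acc
    have hy : f2 (acc + L) (y + L) = f1 acc y + L := h acc y (List.mem_cons_self ..)
    simp only [List.map_cons, accGo, hy]
    exact congrArg _ (ih (fun a i hi => h a i (List.mem_cons_of_mem _ hi)) (f1 acc y))

theorem pyRange_shift (a b L : Int) :
    PySem.List.pyRange (a + L) (b + L) 1 = (PySem.List.pyRange a b 1).map (· + L) := by
  rw [PySem.List.pyRange_one, PySem.List.pyRange_one]
  have : b + L - (a + L) = b - a := by ring
  rw [this, List.map_map]
  apply List.map_congr_left
  intro k _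
  simp only [Function.comp]
  ring

theorem run_get (x : Int) (tw : List Int) (htw : ∀ y ∈ tw, y = x) :
    ∀ (j : Nat) (h : j < tw.length + 1), (x :: tw)[j]'(by simpa using h) = x := by
  intro j h
  cases j with
  | zero => rfl
  | succ j =>
    simp only [List.getElem_cons_succ]
    exact htw _ (List.getElem_mem _)

theorem replicate_getLastD (m : Nat) (a : Int) : (List.replicate m a).getLastD a = a := by
  cases m with
  | zero => rfl
  | succ m => simp [List.getLastD_eq_getLast?, List.getLast?_replicate]

theorem ISm_length (l : List Int) : (ISm l).length = l.length := by
  unfold ISm; simp [PySem.List.length_pyRange_one]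

theorem ISm_get_zero (l : List Int) (hl : 0 < l.length) :
    (ISm l)[0]'(by rw [ISm_length]; exact hl) = true := by
  unfold ISm
  rw [List.getElem_map, PySem.List.getElem_pyRange_one]
  simp

theorem ISm_get_pos (l : List Int) (k : Nat) (hk0 : 0 < k) (hk : k < l.length) :
    (ISm l)[k]'(by rw [ISm_length]; exact hk) =
      !(l.getD (k - 1) 0 == l.getD k 0) := by
  unfold ISm
  rw [List.getElem_map, PySem.List.getElem_pyRange_one]
  have h2 : (0 + (k : Int) - 1) = ((k - 1 : Nat) : Int) := by omega
  have h1 : (0 + (k : Int)) = ((k : Nat) : Int) := by omega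
  rw [h2, h1]
  simp only [PySem.List.pyGetD_natCast]
  have h3 : k ≠ 0 := by omega
  simp [h3]

theorem ISm_getElem? (l : List Int) (k : Nat) (hk : k < l.length) :
    (ISm l)[k]? = some (if k = 0 then true else !(l.getD (k - 1) 0 == l.getD k 0)) := by
  rw [List.getElem?_eq_getElem (by rw [ISm_length]; exact hk)]
  rcases Nat.eq_zero_or_pos k with h | h
  · subst h
    rw [ISm_get_zero l (by omega)]
    simp
  · rw [ISm_get_pos l k h hk]
    have : k ≠ 0 := by omega
    simp [this]

theorem ISm_split (x : Int) (tw s : List Int) (htw : ∀ y ∈ tw, y = x)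
    (hs : ∀ h, s.head? = some h → h ≠ x) :
    ISm ((x :: tw) ++ s) = (true :: List.replicate tw.length false) ++ ISm s := by
  have hlenl : ((x :: tw) ++ s).length = tw.length + 1 + s.length := by simp; omega
  have hget : ∀ j, j < tw.length + 1 → ((x :: tw) ++ s).getD j 0 = x := by
    intro j hj
    rw [List.getD_eq_getElem _ _ (by rw [hlenl]; omega)]
    rw [List.getElem_append_left (by simp; omega)]
    exact run_get x tw htw j hj
  have hgetR : ∀ j, tw.length + 1 ≤ j → j < ((x :: tw) ++ s).length →
      ((x :: tw) ++ s).getD j 0 = s.getD (j - (tw.length + 1)) 0 := by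
    intro j hj1 hj2
    rw [List.getD_eq_getElem _ _ hj2]
    rw [List.getElem_append_right (by simp; omega)]
    rw [List.getD_eq_getElem _ _ (by rw [hlenl] at hj2; omega)]
    simp
  apply List.ext_getElem?
  intro k
  rcases Nat.lt_or_ge k (tw.length + 1 + s.length) with hk | hk
  · rw [ISm_getElem? _ k (by rw [hlenl]; exact hk)]
    rcases Nat.eq_zero_or_pos k with hk0 | hk0
    · subst hk0
      simp
    · have hkne : k ≠ 0 := by omega
      simp only [if_neg hkne]
      rcases Nat.lt_or_ge k (tw.length + 1) with hkL | hkL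
      · rw [hget (k - 1) (by omega), hget k hkL]
        rw [List.getElem?_append_left (by simp; omega)]
        obtain ⟨j, rfl⟩ : ∃ j, k = j + 1 := ⟨k - 1, by omega⟩
        rw [List.getElem?_cons_succ]
        rw [List.getElem?_replicate]
        have : j < tw.length := by omega
        simp [this]
      · rw [List.getElem?_append_right (by simp; omega)]
        have hplen : (true :: List.replicate tw.length false).length = tw.length + 1 := by
          simp
        rw [hplen]
        rw [ISm_getElem? s (k - (tw.length + 1)) (by omega)]
        rcases Nat.eq_or_lt_of_le hkL with hkE | hkG
        · have hk' : k - (tw.length + 1) = 0 := by omega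
          rw [hk']
          rw [hget (k - 1) (by omega)]
          rw [hgetR k (by omega) (by rw [hlenl]; omega)]
          rw [hk']
          obtain ⟨h0, s', rfl⟩ : ∃ h0 s', s = h0 :: s' := by
            cases s with
            | nil => simp at hk; omega
            | cons a b => exact ⟨a, b, rfl⟩
          have hne : h0 ≠ x := hs h0 rfl
          have hne2 : ¬ (x = h0) := fun e => hne e.symm
          simp [hne2]
        · have hne0 : k - (tw.length + 1) ≠ 0 := by omega
          rw [if_neg hne0]
          rw [hgetR (k - 1) (by omega) (by rw [hlenl]; omega)]
          rw [hgetR k (by omega) (by rw [hlenl]; omega)]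
          have : k - 1 - (tw.length + 1) = k - (tw.length + 1) - 1 := by omega
          rw [this]
  · rw [List.getElem?_eq_none (by rw [ISm_length, hlenl]; exact hk)]
    rw [List.getElem?_eq_none (by simp [ISm_length]; omega)]

theorem bl_get_mid (tw : List Int) (s : List Int) (m : Nat) (h1 : 1 ≤ m)
    (h2 : m < tw.length + 1) :
    ((true :: List.replicate tw.length false) ++ ISm s)[m]'(by simp [ISm_length]; omega)
      = false := by
  rw [List.getElem_append_left (by simp; omega)]
  obtain ⟨j, rfl⟩ : ∃ j, m = j + 1 := ⟨m - 1, by omega⟩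
  simp

theorem bl_get_high (tw : List Int) (s : List Int) (m : Nat) (h1 : tw.length + 1 ≤ m)
    (h2 : m < tw.length + 1 + s.length) :
    ((true :: List.replicate tw.length false) ++ ISm s)[m]'(by simp [ISm_length]; omega)
      = (ISm s)[m - (tw.length + 1)]'(by rw [ISm_length]; omega) := by
  rw [List.getElem_append_right (by simp; omega)]
  congr 1
  simp

theorem bl_length (tw s : List Int) :
    ((true :: List.replicate tw.length false) ++ ISm s).length
      = tw.length + 1 + s.length := by
  simp [ISm_length]
  omega

theorem RSm_split (x : Int) (tw s : List Int) (htw : ∀ y ∈ tw, y = x)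
    (hs : ∀ h, s.head? = some h → h ≠ x) :
    RSm ((x :: tw) ++ s) =
      List.replicate (tw.length + 1) 0 ++ (RSm s).map (· + (tw.length + 1 : Int)) := by
  have hIS := ISm_split x tw s htw hs
  have hlenl : (((x :: tw) ++ s).length : Int) = (tw.length : Int) + 1 + s.length := by
    simp
    omega
  unfold RSm
  rw [hIS, hlenl]
  rw [PySem.List.pyRange_one_cons (by omega)]
  show (0 : Int) :: accGo _ 0 _ = _
  rw [show (0 : Int) + 1 = 1 by ring]
  rw [PySem.List.pyRange_one_append 1 ((tw.length : Int) + 1) ((tw.length : Int) + 1 + s.length)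
    (by omega) (by omega)]
  rw [accGo_append]
  have hconst : accGo
      (fun a i => if PySem.List.pyGetD ((true :: List.replicate tw.length false) ++ ISm s) i false then i else a)
      0 (PySem.List.pyRange 1 ((tw.length : Int) + 1))
      = List.replicate tw.length 0 := by
    rw [accGo_const _ _ _ ?_]
    · rw [PySem.List.length_pyRange_one]
      congr 1
      omega
    · intro i hi
      rw [PySem.List.mem_pyRange_one] at hi
      rw [PySem.List.pyGetD_eq_getElem _ _ (by omega) (by rw [bl_length]; push_cast; omega)]
      rw [show ((true :: List.replicate tw.length false) ++ ISm s)[i.toNat]'(by rw [bl_length]; omega)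
          = false from bl_get_mid tw s i.toNat (by omega) (by omega)]
      simp
  rw [hconst, replicate_getLastD]
  cases s with
  | nil =>
    rw [PySem.List.pyRange_one_eq_nil (by simp)]
    rw [PySem.List.pyRange_one_eq_nil (by simp)]
    simp [pyAccumulate, accGo, List.replicate_succ]
  | cons h0 s' =>
    rw [PySem.List.pyRange_one_cons (by push_cast [List.length_cons]; omega)]
    simp only [accGo]
    have hbound : (if PySem.List.pyGetD ((true :: List.replicate tw.length false) ++ ISm (h0 :: s'))
        ((tw.length : Int) + 1) false then ((tw.length : Int) + 1) else (0 : Int))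
        = ((tw.length : Int) + 1) := by
      rw [PySem.List.pyGetD_eq_getElem _ _ (by omega) (by rw [bl_length]; push_cast [List.length_cons]; omega)]
      simp only [show ((tw.length : Int) + 1).toNat = tw.length + 1 from by omega]
      rw [bl_get_high tw (h0 :: s') (tw.length + 1) (by omega) (by simp)]
      simp only [Nat.sub_self]
      rw [ISm_get_zero (h0 :: s') (by simp)]
      simp
    rw [hbound]
    rw [show ((tw.length : Int) + 1) + 1 = 1 + ((tw.length : Int) + 1) by ring]
    rw [show ((tw.length : Int) + 1 + ((h0 :: s').length : Int))
        = ((h0 :: s').length : Int) + ((tw.length : Int) + 1) by ring]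
    rw [pyRange_shift 1 ((h0 :: s').length : Int) ((tw.length : Int) + 1)]
    have hshift := accGo_shift
      (fun a i => if PySem.List.pyGetD ((true :: List.replicate tw.length false) ++ ISm (h0 :: s')) i false then i else a)
      (fun a i => if PySem.List.pyGetD (ISm (h0 :: s')) i false then i else a)
      ((tw.length : Int) + 1)
      (PySem.List.pyRange 1 ((h0 :: s').length : Int))
      ?_ 0
    · rw [zero_add] at hshift
      rw [hshift]
      conv_rhs => rw [PySem.List.pyRange_one_cons (by push_cast [List.length_cons]; omega)]
      simp only [pyAccumulate]
      rw [show (0 : Int) + 1 = 1 by ring]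
      simp [List.replicate_succ]
    · intro a i hi
      rw [PySem.List.mem_pyRange_one] at hi
      have hic : (1 : Int) ≤ i ∧ i < ((h0 :: s').length : Int) := hi
      have hic2 : i < (s'.length : Int) + 1 := by
        have hlc : ((h0 :: s').length : Int) = (s'.length : Int) + 1 := by
          push_cast [List.length_cons]
          ring
        omega
      have hcond : PySem.List.pyGetD ((true :: List.replicate tw.length false) ++ ISm (h0 :: s'))
          (i + ((tw.length : Int) + 1)) false
          = PySem.List.pyGetD (ISm (h0 :: s')) i false := by
        rw [PySem.List.pyGetD_eq_getElem _ _ (by omega)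
          (by rw [bl_length]; push_cast [List.length_cons]; omega)]
        rw [PySem.List.pyGetD_eq_getElem _ _ (by omega)
          (by rw [ISm_length]; push_cast [List.length_cons]; omega)]
        rw [bl_get_high tw (h0 :: s') (i + ((tw.length : Int) + 1)).toNat (by omega)
          (by simp [List.length_cons]; omega)]
        have : (i + ((tw.length : Int) + 1)).toNat - (tw.length + 1) = i.toNat := by omega
        simp only [this]
      beta_reduce
      rw [hcond]
      split_ifs <;> ring

theorem RSm_length (l : List Int) : (RSm l).length = l.length := by
  unfold RSm
  rw [pyAccumulate_length]
  simp [PySem.List.length_pyRange_one]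

theorem up_n_alt_split (x : Int) (tw s : List Int) (htw : ∀ y ∈ tw, y = x)
    (hs : ∀ h, s.head? = some h → h ≠ x) :
    up_n_alt ((x :: tw) ++ s) = runOut x (tw.length + 1) ++ up_n_alt s := by
  have hRS := RSm_split x tw s htw hs
  have hRSlen : (RSm s).length = s.length := RSm_length s
  have hRS0 : ∀ k : Nat, k < tw.length + 1 →
      (RSm ((x :: tw) ++ s)).getD k 0 = 0 := by
    intro k hk
    rw [hRS]
    rw [List.getD_eq_getElem _ _ (by simp [hRSlen]; omega)]
    rw [List.getElem_append_left (by simp; omega)]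
    simp
  have hRS1 : ∀ k : Nat, k < s.length →
      (RSm ((x :: tw) ++ s)).getD (tw.length + 1 + k) 0
        = (RSm s).getD k 0 + ((tw.length : Int) + 1) := by
    intro k hk
    rw [hRS]
    rw [List.getD_eq_getElem _ _ (by simp [hRSlen]; omega)]
    rw [List.getElem_append_right (by simp)]
    rw [List.getD_eq_getElem _ _ (by rw [hRSlen]; exact hk)]
    simp only [List.length_replicate]
    rw [List.getElem_map]
    congr 2
    omega
  rw [up_n_alt_def, up_n_alt_def]
  rw [PySem.List.enumerate_append]
  rw [List.map_append]
  congr 1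
  · -- the run contributes runOut x (tw.length + 1)
    apply List.ext_getElem
    · simp [PySem.List.length_enumerate, runOut_length]
    · intro k h1 h2
      have hk : k < tw.length + 1 := by
        simpa [PySem.List.length_enumerate] using h1
      rw [List.getElem_map]
      rw [PySem.List.getElem_enumerate _ _ k (by simpa [PySem.List.length_enumerate] using h1)]
      simp only
      rw [run_get x tw htw k hk]
      have hidx : ((0 : Int) + (k : Int)) = ((k : Nat) : Int) := by omega
      rw [hidx]
      simp only [PySem.List.pyGetD_natCast]
      rw [hRS0 k hk]
      unfold runOut
      split_ifs with hx
      · simp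
      · rw [List.getElem_map, List.getElem_range]
        ring
  · -- the tail is exactly up_n_alt s, shifted run-start indices cancelling
    apply List.ext_getElem
    · simp [PySem.List.length_enumerate]
    · intro k h1 h2
      have hk : k < s.length := by
        simpa [PySem.List.length_enumerate] using h2
      rw [List.getElem_map, List.getElem_map]
      rw [PySem.List.getElem_enumerate _ _ k (by simpa [PySem.List.length_enumerate] using hk)]
      rw [PySem.List.getElem_enumerate _ _ k (by simpa [PySem.List.length_enumerate] using hk)]
      simp only
      by_cases hz : s[k] = 0
      · simp [hz]
      · rw [if_neg hz, if_neg hz]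
        have hidx1 : ((0 : Int) + ((x :: tw).length : Int) + (k : Int))
            = ((tw.length + 1 + k : Nat) : Int) := by
          push_cast [List.length_cons]
          ring
        have hidx2 : ((0 : Int) + (k : Int)) = ((k : Nat) : Int) := by omega
        rw [hidx1, hidx2]
        simp only [PySem.List.pyGetD_natCast]
        rw [hRS1 k hk]
        push_cast [List.length_cons]
        ring

theorem main_lemma (n : Nat) : ∀ (l : List Int), l.length ≤ n → up_n_alt l = up_n l := by
  induction n with
  | zero =>
    intro l hl
    cases l with
    | nil => rw [up_n_alt_def]; simp [up_n, pyGroupby, PySem.List.enumerate]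
    | cons x xs => simp at hl
  | succ n ih =>
    intro l hl
    cases l with
    | nil => rw [up_n_alt_def]; simp [up_n, pyGroupby, PySem.List.enumerate]
    | cons x xs =>
      have hsplit : xs.takeWhile (· == x) ++ xs.dropWhile (· == x) = xs :=
        List.takeWhile_append_dropWhile
      have htw : ∀ y ∈ xs.takeWhile (· == x), y = x := by
        intro y hy
        have := List.mem_takeWhile_imp hy
        simpa using this
      have hhd : ∀ h, (xs.dropWhile (· == x)).head? = some h → h ≠ x := by
        intro h hh hc
        have hne : xs.dropWhile (· == x) ≠ [] := by
          intro e; rw [e] at hh; simp at hh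
        have hf := List.head_dropWhile_not (· == x) (w := hne)
        have hhd2 : (xs.dropWhile (· == x)).head hne = h := by
          have h2 := List.head?_eq_some_head hne
          rw [h2] at hh
          exact Option.some.inj hh
        rw [hhd2, hc] at hf
        simp at hf
      have hlen : (xs.dropWhile (· == x)).length ≤ n := by
        have h1 := List.length_dropWhile_le (· == x) xs
        simp only [List.length_cons] at hl
        omega
      have hx : x :: xs = (x :: xs.takeWhile (· == x)) ++ xs.dropWhile (· == x) := by
        simp [hsplit]
      rw [hx, up_n_alt_split x _ _ htw hhd]
      rw [show (x :: xs.takeWhile (· == x)) ++ xs.dropWhile (· == x) = x :: xs from hx.symm]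
      rw [up_n_cons, ih _ hlen]

-- ===== VERDICT (by name: the statement is the Claim_ definition above) =====
theorem up_n_spec : Claim_equal_up_n := by
  intro Series _
  unfold Spec_up_n
  exact (main_lemma Series.length Series le_rfl).symm
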